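-- pv_equiv track=rewrite | github.com/AbdoulayeDiop/simrec | meta_features.py | get_attribute_names
-- ===== SOURCE A (Python) =====
-- def get_attribute_names(name):
--     if name in ["n_instances", "n_features", "dim", "num_on_cat", "n_num_att", "n_cat_att"]:
--         return [name]
--     elif name in [
--         "means_num_att", "std_num_att", "kurtosis_num_att", "skewness_num_att",
--         "means_squared_num_att", "std_squared_num_att", "kurtosis_squared_num_att", "skewness_squared_num_att",
--         "means_internal_product_num_att", "std_internal_product_num_att", "kurtosis_internal_product_num_att", "skewness_internal_product_num_att",
--         "covariance",
--         "card_cat_att", "entropy_cat_att", "mutual_info_cat_att", "std_freq_cat_att"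
--         ]:
--         return [f"{p}_{name}" for p in ["min", "q1", "mean", "q3", "max"]]
--     elif name=="euclidean_distance_distribution":
--         return [f"euclidean_{i}" for i in range(10)]
--     elif name=="cosine_distance_distribution":
--         return [f"cosine_{i}" for i in range(10)]
--     elif name=="canberra_distance_distribution":
--         return [f"canberra_{i}" for i in range(10)]
--     elif name=="lorentzian_distance_distribution":
--         return [f"lorentzian_{i}" for i in range(10)]
--     elif name=="divergence_distance_distribution":
--         return [f"divergence_{i}" for i in range(10)]
--     elif name=="isolation_forest":
--         return [f"isolation_forest_{i}" for i in range(10)]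
--     return
-- ===== SOURCE B (Python) =====
-- # Table-driven: one dict from feature name to its attribute-name list, built
-- # once at import time by three loops; the function itself is a single lookup.
-- _SINGLES = ["n_instances", "n_features", "dim", "num_on_cat", "n_num_att", "n_cat_att"]
-- _QUANTILE = [
--     "means_num_att", "std_num_att", "kurtosis_num_att", "skewness_num_att",
--     "means_squared_num_att", "std_squared_num_att", "kurtosis_squared_num_att", "skewness_squared_num_att",
--     "means_internal_product_num_att", "std_internal_product_num_att",
--     "kurtosis_internal_product_num_att", "skewness_internal_product_num_att",
--     "covariance",
--     "card_cat_att", "entropy_cat_att", "mutual_info_cat_att", "std_freq_cat_att",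
-- ]
-- _TABLE = {}
-- for _n in _SINGLES:
--     _TABLE[_n] = [_n]
-- for _n in _QUANTILE:
--     _TABLE[_n] = [f"{p}_{_n}" for p in ["min", "q1", "mean", "q3", "max"]]
-- for _stem in ["euclidean", "cosine", "canberra", "lorentzian", "divergence"]:
--     _TABLE[f"{_stem}_distance_distribution"] = [f"{_stem}_{i}" for i in range(10)]
-- _TABLE["isolation_forest"] = [f"isolation_forest_{i}" for i in range(10)]
--
-- def get_attribute_names(name):
--     return _TABLE.get(name)
-- ===== Notes on version B (the rewrite author's own statement) =====
-- stated objective: alternative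
-- what changed: A's if/elif branch chain with per-branch comprehensions is replaced by a table-driven design: a dict from every known feature name to its full attribute list is built once at import time by three loops, and the function body is reduced to a single dict .get(name) lookup.
import Mathlib
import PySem

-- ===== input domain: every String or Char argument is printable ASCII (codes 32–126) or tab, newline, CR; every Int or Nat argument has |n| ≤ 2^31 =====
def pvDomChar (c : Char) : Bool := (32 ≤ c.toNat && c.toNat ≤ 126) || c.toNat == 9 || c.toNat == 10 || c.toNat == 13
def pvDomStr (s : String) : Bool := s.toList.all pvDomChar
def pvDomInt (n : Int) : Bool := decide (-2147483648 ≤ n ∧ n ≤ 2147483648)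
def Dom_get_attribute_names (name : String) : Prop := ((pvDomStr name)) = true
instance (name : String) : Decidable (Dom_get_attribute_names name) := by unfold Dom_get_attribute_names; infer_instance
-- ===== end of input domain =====

-- B replaces A's if/elif branch chain by one name→attributes dict built once by three loops; the function is a single table lookup (alternative decomposition, same behaviour).

-- ===== PORT A =====
-- f"{prefix}_{i}" for an int i
def pvFmtInt (pfx : String) (i : Int) : String :=
  String.ofList (pfx.toList ++ '_' :: PySem.Int.toChars i)

-- f"{p}_{name}"
def pvFmtStr (p : String) (name : String) : String :=
  String.ofList (p.toList ++ '_' :: name.toList)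

def get_attribute_names (name : String) : Option (List String) :=
  if name ∈ ["n_instances", "n_features", "dim", "num_on_cat", "n_num_att", "n_cat_att"] then
    some [name]
  else if name ∈ [
      "means_num_att", "std_num_att", "kurtosis_num_att", "skewness_num_att",
      "means_squared_num_att", "std_squared_num_att", "kurtosis_squared_num_att", "skewness_squared_num_att",
      "means_internal_product_num_att", "std_internal_product_num_att", "kurtosis_internal_product_num_att", "skewness_internal_product_num_att",
      "covariance",
      "card_cat_att", "entropy_cat_att", "mutual_info_cat_att", "std_freq_cat_att"] then
    some ((["min", "q1", "mean", "q3", "max"] : List String).map (fun p => pvFmtStr p name))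
  else if name = "euclidean_distance_distribution" then
    some ((PySem.List.pyRange 0 10 1).map (fun i => pvFmtInt "euclidean" i))
  else if name = "cosine_distance_distribution" then
    some ((PySem.List.pyRange 0 10 1).map (fun i => pvFmtInt "cosine" i))
  else if name = "canberra_distance_distribution" then
    some ((PySem.List.pyRange 0 10 1).map (fun i => pvFmtInt "canberra" i))
  else if name = "lorentzian_distance_distribution" then
    some ((PySem.List.pyRange 0 10 1).map (fun i => pvFmtInt "lorentzian" i))
  else if name = "divergence_distance_distribution" then
    some ((PySem.List.pyRange 0 10 1).map (fun i => pvFmtInt "divergence" i))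
  else if name = "isolation_forest" then
    some ((PySem.List.pyRange 0 10 1).map (fun i => pvFmtInt "isolation_forest" i))
  else none

-- ===== PORT B =====
def pvSingles : List String := ["n_instances", "n_features", "dim", "num_on_cat", "n_num_att", "n_cat_att"]

def pvQuantile : List String := [
    "means_num_att", "std_num_att", "kurtosis_num_att", "skewness_num_att",
    "means_squared_num_att", "std_squared_num_att", "kurtosis_squared_num_att", "skewness_squared_num_att",
    "means_internal_product_num_att", "std_internal_product_num_att",
    "kurtosis_internal_product_num_att", "skewness_internal_product_num_att",
    "covariance",
    "card_cat_att", "entropy_cat_att", "mutual_info_cat_att", "std_freq_cat_att"]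

-- the three table-building loops of Source B, as folds over the same lists
def pvTable : PySem.Dict String (List String) :=
  let t := pvSingles.foldl (fun t n => t.insert n [n]) PySem.Dict.empty
  let t := pvQuantile.foldl
    (fun t n => t.insert n ((["min", "q1", "mean", "q3", "max"] : List String).map (fun p => pvFmtStr p n))) t
  let t := (["euclidean", "cosine", "canberra", "lorentzian", "divergence"] : List String).foldl
    (fun t stem => t.insert (pvFmtStr stem "distance_distribution")
      ((PySem.List.pyRange 0 10 1).map (fun i => pvFmtInt stem i))) t
  t.insert "isolation_forest" ((PySem.List.pyRange 0 10 1).map (fun i => pvFmtInt "isolation_forest" i))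

def get_attribute_names_alt (name : String) : Option (List String) :=
  pvTable.get? name

-- ===== PRECONDITION & SPEC =====
def Spec_get_attribute_names (name : String) (out : Option (List String)) : Prop := out = get_attribute_names_alt name
instance (name : String) (out : Option (List String)) : Decidable (Spec_get_attribute_names name out) := by unfold Spec_get_attribute_names; infer_instance

-- ===== CLAIM =====
def Claim_equal_get_attribute_names : Prop := ∀ (name : String), Dom_get_attribute_names name → Spec_get_attribute_names name (get_attribute_names name)

-- ===== LEMMAS AND PROOFS =====
-- all 29 keys of the table
def pvAllKeys : List String := ["n_instances", "n_features", "dim", "num_on_cat", "n_num_att", "n_cat_att", "means_num_att", "std_num_att", "kurtosis_num_att", "skewness_num_att", "means_squared_num_att", "std_squared_num_att", "kurtosis_squared_num_att", "skewness_squared_num_att", "means_internal_product_num_att", "std_internal_product_num_att", "kurtosis_internal_product_num_att", "skewness_internal_product_num_att", "covariance", "card_cat_att", "entropy_cat_att", "mutual_info_cat_att", "std_freq_cat_att", "euclidean_distance_distribution", "cosine_distance_distribution", "canberra_distance_distribution", "lorentzian_distance_distribution", "divergence_distance_distribution", "isolation_forest"]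

theorem pvTable_eq : pvTable = PySem.Dict.mk [
  ("n_instances", ["n_instances"]),
  ("n_features", ["n_features"]),
  ("dim", ["dim"]),
  ("num_on_cat", ["num_on_cat"]),
  ("n_num_att", ["n_num_att"]),
  ("n_cat_att", ["n_cat_att"]),
  ("means_num_att", ["min_means_num_att", "q1_means_num_att", "mean_means_num_att", "q3_means_num_att", "max_means_num_att"]),
  ("std_num_att", ["min_std_num_att", "q1_std_num_att", "mean_std_num_att", "q3_std_num_att", "max_std_num_att"]),
  ("kurtosis_num_att", ["min_kurtosis_num_att", "q1_kurtosis_num_att", "mean_kurtosis_num_att", "q3_kurtosis_num_att", "max_kurtosis_num_att"]),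
  ("skewness_num_att", ["min_skewness_num_att", "q1_skewness_num_att", "mean_skewness_num_att", "q3_skewness_num_att", "max_skewness_num_att"]),
  ("means_squared_num_att", ["min_means_squared_num_att", "q1_means_squared_num_att", "mean_means_squared_num_att", "q3_means_squared_num_att", "max_means_squared_num_att"]),
  ("std_squared_num_att", ["min_std_squared_num_att", "q1_std_squared_num_att", "mean_std_squared_num_att", "q3_std_squared_num_att", "max_std_squared_num_att"]),
  ("kurtosis_squared_num_att", ["min_kurtosis_squared_num_att", "q1_kurtosis_squared_num_att", "mean_kurtosis_squared_num_att", "q3_kurtosis_squared_num_att", "max_kurtosis_squared_num_att"]),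
  ("skewness_squared_num_att", ["min_skewness_squared_num_att", "q1_skewness_squared_num_att", "mean_skewness_squared_num_att", "q3_skewness_squared_num_att", "max_skewness_squared_num_att"]),
  ("means_internal_product_num_att", ["min_means_internal_product_num_att", "q1_means_internal_product_num_att", "mean_means_internal_product_num_att", "q3_means_internal_product_num_att", "max_means_internal_product_num_att"]),
  ("std_internal_product_num_att", ["min_std_internal_product_num_att", "q1_std_internal_product_num_att", "mean_std_internal_product_num_att", "q3_std_internal_product_num_att", "max_std_internal_product_num_att"]),
  ("kurtosis_internal_product_num_att", ["min_kurtosis_internal_product_num_att", "q1_kurtosis_internal_product_num_att", "mean_kurtosis_internal_product_num_att", "q3_kurtosis_internal_product_num_att", "max_kurtosis_internal_product_num_att"]),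
  ("skewness_internal_product_num_att", ["min_skewness_internal_product_num_att", "q1_skewness_internal_product_num_att", "mean_skewness_internal_product_num_att", "q3_skewness_internal_product_num_att", "max_skewness_internal_product_num_att"]),
  ("covariance", ["min_covariance", "q1_covariance", "mean_covariance", "q3_covariance", "max_covariance"]),
  ("card_cat_att", ["min_card_cat_att", "q1_card_cat_att", "mean_card_cat_att", "q3_card_cat_att", "max_card_cat_att"]),
  ("entropy_cat_att", ["min_entropy_cat_att", "q1_entropy_cat_att", "mean_entropy_cat_att", "q3_entropy_cat_att", "max_entropy_cat_att"]),
  ("mutual_info_cat_att", ["min_mutual_info_cat_att", "q1_mutual_info_cat_att", "mean_mutual_info_cat_att", "q3_mutual_info_cat_att", "max_mutual_info_cat_att"]),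
  ("std_freq_cat_att", ["min_std_freq_cat_att", "q1_std_freq_cat_att", "mean_std_freq_cat_att", "q3_std_freq_cat_att", "max_std_freq_cat_att"]),
  ("euclidean_distance_distribution", ["euclidean_0", "euclidean_1", "euclidean_2", "euclidean_3", "euclidean_4", "euclidean_5", "euclidean_6", "euclidean_7", "euclidean_8", "euclidean_9"]),
  ("cosine_distance_distribution", ["cosine_0", "cosine_1", "cosine_2", "cosine_3", "cosine_4", "cosine_5", "cosine_6", "cosine_7", "cosine_8", "cosine_9"]),
  ("canberra_distance_distribution", ["canberra_0", "canberra_1", "canberra_2", "canberra_3", "canberra_4", "canberra_5", "canberra_6", "canberra_7", "canberra_8", "canberra_9"]),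
  ("lorentzian_distance_distribution", ["lorentzian_0", "lorentzian_1", "lorentzian_2", "lorentzian_3", "lorentzian_4", "lorentzian_5", "lorentzian_6", "lorentzian_7", "lorentzian_8", "lorentzian_9"]),
  ("divergence_distance_distribution", ["divergence_0", "divergence_1", "divergence_2", "divergence_3", "divergence_4", "divergence_5", "divergence_6", "divergence_7", "divergence_8", "divergence_9"]),
  ("isolation_forest", ["isolation_forest_0", "isolation_forest_1", "isolation_forest_2", "isolation_forest_3", "isolation_forest_4", "isolation_forest_5", "isolation_forest_6", "isolation_forest_7", "isolation_forest_8", "isolation_forest_9"])] := by decide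

theorem get_attribute_names_spec : Claim_equal_get_attribute_names := by
  intro name _
  show get_attribute_names name = get_attribute_names_alt name
  by_cases h : name ∈ pvAllKeys
  · simp only [pvAllKeys, List.mem_cons, List.not_mem_nil, or_false] at h
    rcases h with rfl|rfl|rfl|rfl|rfl|rfl|rfl|rfl|rfl|rfl|rfl|rfl|rfl|rfl|rfl|rfl|rfl|rfl|rfl|rfl|rfl|rfl|rfl|rfl|rfl|rfl|rfl|rfl|rfl <;> decide
  · have hbeq : ∀ k ∈ pvAllKeys, (k == name) = false := by
      intro k hk
      exact beq_eq_false_iff_ne.mpr (fun e => h (e ▸ hk))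
    have m6 : name ∉ pvSingles := fun hm => h ((by decide : pvSingles ⊆ pvAllKeys) hm)
    have m17 : name ∉ pvQuantile := fun hm => h ((by decide : pvQuantile ⊆ pvAllKeys) hm)
    have e1 : ¬ name = "euclidean_distance_distribution" := fun e => h (e ▸ (by decide))
    have e2 : ¬ name = "cosine_distance_distribution" := fun e => h (e ▸ (by decide))
    have e3 : ¬ name = "canberra_distance_distribution" := fun e => h (e ▸ (by decide))
    have e4 : ¬ name = "lorentzian_distance_distribution" := fun e => h (e ▸ (by decide))
    have e5 : ¬ name = "divergence_distance_distribution" := fun e => h (e ▸ (by decide))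
    have e6 : ¬ name = "isolation_forest" := fun e => h (e ▸ (by decide))
    have hA : get_attribute_names name = none := by
      unfold get_attribute_names
      rw [if_neg (by simpa [pvSingles] using m6), if_neg (by simpa [pvQuantile] using m17),
        if_neg e1, if_neg e2, if_neg e3, if_neg e4, if_neg e5, if_neg e6]
    have hB : get_attribute_names_alt name = none := by
      unfold get_attribute_names_alt
      rw [pvTable_eq]
      simp only [PySem.Dict.get?_mk_cons]
      simp [hbeq, pvAllKeys, PySem.Dict.get?]
    rw [hA, hB]
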